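-- pv_equiv track=rewrite | github.com/gregueiras/advent-of-code | 2020/4/4.1.py | hasRepeat
-- ===== SOURCE A (Python) =====
-- def hasRepeat(number):
--     lastDigit = str(number)[:1]
--     seqSize = 1
--     repeat = False
--
--     for digit in str(number)[1:]:
--         if (digit == lastDigit):
--             seqSize += 1
--         else:
--             if (seqSize == 2):
--                 repeat = True
--             seqSize = 1
--
--         lastDigit = digit
--
--     return repeat or seqSize == 2
-- ===== SOURCE B (Python) =====
-- def hasRepeat(number):
--     def runs(cs):
--         if not cs:
--             return []
--         rest = runs(cs[1:])
--         if rest and rest[0][0] == cs[0]: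
--             return [(cs[0], rest[0][1] + 1)] + rest[1:]
--         return [(cs[0], 1)] + rest
--     return any(n == 2 for _, n in runs(str(number)))
-- ===== Notes on version B (the rewrite author's own statement) =====
-- stated objective: alternative
-- what changed: B builds the maximal runs of str(number) as first-class (char, length) pairs by recursion on the string and returns whether any run has length exactly 2, instead of A's left-to-right scan hand-tracking lastDigit/seqSize and a repeat flag with a special check for the trailing run.
import Mathlib
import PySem

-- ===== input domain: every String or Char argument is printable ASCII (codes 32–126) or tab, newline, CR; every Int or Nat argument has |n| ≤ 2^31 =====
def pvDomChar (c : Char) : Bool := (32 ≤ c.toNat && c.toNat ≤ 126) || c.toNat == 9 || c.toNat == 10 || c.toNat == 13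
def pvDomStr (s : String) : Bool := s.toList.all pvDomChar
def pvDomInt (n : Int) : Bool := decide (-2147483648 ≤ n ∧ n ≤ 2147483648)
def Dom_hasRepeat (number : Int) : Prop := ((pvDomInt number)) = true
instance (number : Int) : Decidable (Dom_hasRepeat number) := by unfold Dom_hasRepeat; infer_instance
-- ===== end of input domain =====

-- Header: B replaces A's flag-and-counter scan by a recursion that materialises the
-- maximal runs of str(number) as (char, length) pairs and asks whether any has length
-- exactly 2; same cost, different decomposition (objective: alternative).


-- ===== PORT A =====
-- the for-loop over str(number)[1:] with state (lastDigit, seqSize, repeat)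
def hasRepeatLoop (last : Char) (seq : Nat) (rep : Bool) : List Char → Bool
  | [] => rep || (seq == 2)
  | d :: ds =>
    if d == last then hasRepeatLoop d (seq + 1) rep ds
    else hasRepeatLoop d 1 (rep || (seq == 2)) ds

def hasRepeat (number : Int) : Bool :=
  -- lastDigit = str(number)[:1]; loop over str(number)[1:]; str(number) is never empty
  match (PySem.Int.toStr number).toList with
  | [] => false || (1 == 2)
  | c :: rest => hasRepeatLoop c 1 false rest

-- ===== PORT B =====
-- runs cs : the maximal runs of cs as (char, length) pairs, by recursion on cs
def pvRuns : List Char → List (Char × Nat)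
  | [] => []
  | c :: cs =>
    match pvRuns cs with
    | (d, n) :: rest => if d == c then (c, n + 1) :: rest else (c, 1) :: (d, n) :: rest
    | [] => [(c, 1)]

def hasRepeat_alt (number : Int) : Bool :=
  (pvRuns (PySem.Int.toStr number).toList).any (fun p => p.2 == 2)

-- ===== PRECONDITION & SPEC =====
def Spec_hasRepeat (number : Int) (out : Bool) : Prop := out = hasRepeat_alt number
instance (number : Int) (out : Bool) : Decidable (Spec_hasRepeat number out) := by unfold Spec_hasRepeat; infer_instance

-- ===== CLAIM (what is proved, stated in full; the proofs are below) =====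
def Claim_equal_hasRepeat : Prop := ∀ (number : Int), Dom_hasRepeat number → Spec_hasRepeat number (hasRepeat number)

-- ===== LEMMAS AND PROOFS =====

-- pvRuns (c :: ds) starts with a run of c
theorem pvRuns_cons (c : Char) (ds : List Char) :
    ∃ k rest, pvRuns (c :: ds) = (c, k) :: rest := by
  unfold pvRuns
  rcases h : pvRuns ds with _ | ⟨⟨d, n⟩, rest⟩
  · exact ⟨1, [], rfl⟩
  · by_cases hd : d == c
    · refine ⟨n + 1, rest, ?_⟩; simp [hd]
    · refine ⟨1, (d, n) :: rest, ?_⟩; simp [hd]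

-- the loop with state (c, seq, rep) computes rep ∨ (first run of c::ds, extended by seq-1, = 2) ∨ some later run = 2
theorem hasRepeatLoop_eq (ds : List Char) : ∀ (c : Char) (n : Nat) (rep : Bool) (k : Nat)
    (rest : List (Char × Nat)), 1 ≤ n → pvRuns (c :: ds) = (c, k) :: rest →
    hasRepeatLoop c n rep ds = (rep || (n + k - 1 == 2) || rest.any (fun p => p.2 == 2)) := by
  induction ds with
  | nil =>
    intro c n rep k rest hn h
    have h' : ((c, 1) = (c, k) ∧ ([] : List (Char × Nat)) = rest) := by
      simpa [pvRuns, List.cons.injEq] using h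
    obtain ⟨h1, h2⟩ := h'
    have hk : (1 : Nat) = k := congrArg Prod.snd h1
    subst hk; subst h2
    simp only [hasRepeatLoop]
    have hn1 : n + 1 - 1 = n := by omega
    rw [hn1]; simp
  | cons d ds ih =>
    intro c n rep k rest hn h
    by_cases hd : d == c
    · have hc : d = c := by simpa using hd
      subst hc
      obtain ⟨k', rest', h'⟩ := pvRuns_cons d ds
      have hruns : pvRuns (d :: d :: ds) = (d, k' + 1) :: rest' := by
        unfold pvRuns
        rw [show pvRuns (d :: ds) = (d, k') :: rest' from h']
        simp
      rw [hruns] at h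
      obtain ⟨hk, hrest⟩ : k' + 1 = k ∧ rest' = rest := by
        constructor <;> [exact congrArg Prod.snd (List.head_eq_of_cons_eq h);
          exact List.tail_eq_of_cons_eq h]
      subst hk; subst hrest
      have := ih d (n + 1) rep k' rest' (by omega) h'
      simp only [hasRepeatLoop, hd, if_pos]
      rw [this]
      have : n + 1 + k' - 1 = n + (k' + 1) - 1 := by omega
      rw [this]
    · obtain ⟨k', rest', h'⟩ := pvRuns_cons d ds
      have hruns : pvRuns (c :: d :: ds) = (c, 1) :: (d, k') :: rest' := by
        unfold pvRuns
        rw [show pvRuns (d :: ds) = (d, k') :: rest' from h']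
        simp [hd]
      rw [hruns] at h
      obtain ⟨hk, hrest⟩ : (1 : Nat) = k ∧ (d, k') :: rest' = rest := by
        constructor <;> [exact congrArg Prod.snd (List.head_eq_of_cons_eq h);
          exact List.tail_eq_of_cons_eq h]
      subst hk; subst hrest
      have := ih d 1 (rep || (n == 2)) k' rest' (by omega) h'
      simp only [hasRepeatLoop, hd]
      rw [if_neg (by simp [hd]), this]
      have h1 : 1 + k' - 1 = k' := by omega
      have h2 : n + 1 - 1 = n := by omega
      rw [h1, h2]
      simp [List.any_cons, Bool.or_assoc, Bool.or_comm, Bool.or_left_comm]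


theorem hasRepeat_eq_alt (number : Int) : hasRepeat number = hasRepeat_alt number := by
  unfold hasRepeat hasRepeat_alt
  rcases h : (PySem.Int.toStr number).toList with _ | ⟨c, rest⟩
  · simp [pvRuns]
  · obtain ⟨k, rs, hr⟩ := pvRuns_cons c rest
    show hasRepeatLoop c 1 false rest = (pvRuns (c :: rest)).any fun p => p.2 == 2
    rw [hasRepeatLoop_eq rest c 1 false k rs (by omega) hr, hr]
    simp [List.any_cons]

-- ===== VERDICT (by name: the statement is the Claim_ definition above) =====
theorem hasRepeat_spec : Claim_equal_hasRepeat := by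
  intro number _
  exact hasRepeat_eq_alt number
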